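-- pv_equiv track=rewrite | github.com/Jay54520/Problem-Solving-with-Algorithms-and-DataStructures | chapter02_algorithm_analysis/2.2.2_anagram_solution.py | angram_solution1
-- ===== SOURCE A (Python) =====
-- def angram_solution1(str1, str2):
--     a_list = list(str2)
--     pos1 = 0
--     still_ok = True
--     while pos1 < len(str1) and still_ok:
--         pos2 = 0
--         found = False
--         while pos2 < len(a_list) and not found:
--             if str1[pos1] == a_list[pos2]:
--                 found = True
--             else:
--                 pos2 += 1
--         # 找完了 str2 还是没有找到
--         if not found:
--             still_ok = False
--         # 找到了相同的，则继续找下一个，并且把 a_list 中找到的替换点掉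
--         else:
--             pos1 += 1
--             a_list[pos2] = None
--     return still_ok
-- ===== SOURCE B (Python) =====
-- def angram_solution1(str1, str2):
--     counts = {}
--     for ch in str2:
--         counts[ch] = counts.get(ch, 0) + 1
--     for ch in str1:
--         n = counts.get(ch, 0)
--         if n == 0:
--             return False
--         counts[ch] = n - 1
--     return True
-- ===== Notes on version B (the rewrite author's own statement) =====
-- stated objective: faster
-- what changed: Replaced the nested scan-and-blank-out greedy (for each char of str1, linearly search a mutable copy of str2 and overwrite the match with None) by a single-pass character counter over str2 followed by a single consuming pass over str1.
import Mathlib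
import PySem

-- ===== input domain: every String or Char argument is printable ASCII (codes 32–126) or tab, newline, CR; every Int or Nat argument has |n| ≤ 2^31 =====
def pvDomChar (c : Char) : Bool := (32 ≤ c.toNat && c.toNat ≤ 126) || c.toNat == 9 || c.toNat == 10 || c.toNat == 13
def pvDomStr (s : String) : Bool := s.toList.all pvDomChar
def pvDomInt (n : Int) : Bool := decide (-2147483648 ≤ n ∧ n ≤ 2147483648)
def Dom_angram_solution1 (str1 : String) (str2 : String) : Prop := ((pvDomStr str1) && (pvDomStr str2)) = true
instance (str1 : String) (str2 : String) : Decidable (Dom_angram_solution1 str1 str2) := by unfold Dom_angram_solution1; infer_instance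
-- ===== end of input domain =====

-- B replaces A's nested scan-and-blank-out (quadratic) with a one-pass counter plus a
-- consuming pass (linear); objective: faster.

-- ===== PORT A =====
-- inner while loop: scan a_list for the first entry equal to str1[pos1]; on a hit,
-- overwrite it with None (here: the entry becomes `none`) and return the updated list;
-- if the scan runs off the end (found stays False), return none.
def pvFindReplace (c : Char) : List (Option Char) → Option (List (Option Char))
  | [] => none
  | x :: xs =>
    if x = some c then some (none :: xs)
    else (pvFindReplace c xs).map (x :: ·)

-- outer while loop: advance pos1 through str1 while still_ok
def pvLoopA : List Char → List (Option Char) → Bool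
  | [], _ => true
  | c :: rest, al =>
    match pvFindReplace c al with
    | none => false          -- not found: still_ok = False, loop exits
    | some al' => pvLoopA rest al'

def angram_solution1 (str1 : String) (str2 : String) : Bool :=
  pvLoopA str1.toList (str2.toList.map some)   -- a_list = list(str2)

-- ===== PORT B =====
-- first for-loop of Source B: counts[ch] = counts.get(ch, 0) + 1
def pvCount2 (str2 : String) : PySem.Dict Char Int :=
  str2.toList.foldl (fun d ch => d.insert ch (d.getD ch 0 + 1)) PySem.Dict.empty

-- second for-loop of Source B with its early return
def pvConsume : List Char → PySem.Dict Char Int → Bool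
  | [], _ => true
  | ch :: rest, d =>
    let n := d.getD ch 0
    if n = 0 then false else pvConsume rest (d.insert ch (n - 1))

def angram_solution1_alt (str1 : String) (str2 : String) : Bool :=
  pvConsume str1.toList (pvCount2 str2)

-- ===== PRECONDITION & SPEC =====
def Spec_angram_solution1 (str1 : String) (str2 : String) (out : Bool) : Prop := out = angram_solution1_alt str1 str2
instance (str1 : String) (str2 : String) (out : Bool) : Decidable (Spec_angram_solution1 str1 str2 out) := by unfold Spec_angram_solution1; infer_instance

-- ===== CLAIM (what is proved, stated in full; the proofs are below) =====
def Claim_equal_angram_solution1 : Prop := ∀ (str1 : String) (str2 : String), Dom_angram_solution1 str1 str2 → Spec_angram_solution1 str1 str2 (angram_solution1 str1 str2)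

-- ===== LEMMAS AND PROOFS =====

-- the scan fails exactly when `some c` does not occur in a_list
lemma pvFindReplace_none (c : Char) (al : List (Option Char)) :
    pvFindReplace c al = none ↔ (some c) ∉ al := by
  induction al with
  | nil => simp [pvFindReplace]
  | cons x xs ih =>
    by_cases hx : x = some c
    · simp [pvFindReplace, hx]
    · simp [pvFindReplace, hx, Option.map_eq_none_iff, ih, Ne.symm hx]

-- a successful scan decrements the count of `some c` and keeps all other counts
lemma pvFindReplace_count (c : Char) (al al' : List (Option Char))
    (h : pvFindReplace c al = some al') :
    al'.count (some c) + 1 = al.count (some c) ∧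
    ∀ c' : Char, c' ≠ c → al'.count (some c') = al.count (some c') := by
  induction al generalizing al' with
  | nil => simp [pvFindReplace] at h
  | cons x xs ih =>
    by_cases hx : x = some c
    · simp only [pvFindReplace, if_pos hx] at h
      cases h
      subst hx
      constructor
      · simp
      · intro c' hc'
        simp [(by simpa using hc'.symm : some c ≠ some c')]
    · simp only [pvFindReplace, if_neg hx] at h
      cases hfr : pvFindReplace c xs with
      | none => simp [hfr] at h
      | some ys =>
        simp only [hfr, Option.map_some] at h
        cases h
        obtain ⟨h1, h2⟩ := ih ys hfr
        constructor
        · simp [List.count_cons]; omega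
        · intro c' hc'
          simp [List.count_cons, h2 c' hc']

-- main invariant: if the dict holds exactly the counts of the remaining a_list,
-- A's loop and B's loop agree
lemma pvLoop_eq (l1 : List Char) (al : List (Option Char)) (d : PySem.Dict Char Int)
    (H : ∀ c : Char, (al.count (some c) : Int) = d.getD c 0) :
    pvLoopA l1 al = pvConsume l1 d := by
  induction l1 generalizing al d with
  | nil => rfl
  | cons c rest ih =>
    simp only [pvLoopA, pvConsume]
    by_cases h0 : d.getD c 0 = 0
    · have hcnt : al.count (some c) = 0 := by
        have := H c; omega
      have hnot : (some c) ∉ al := by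
        simpa [List.count_eq_zero] using hcnt
      rw [(pvFindReplace_none c al).mpr hnot]
      simp [h0]
    · have hmem : (some c) ∈ al := by
        by_contra hn
        exact h0 (by rw [← H c]; simp [List.count_eq_zero.mpr hn])
      cases hfr : pvFindReplace c al with
      | none => exact absurd ((pvFindReplace_none c al).mp hfr) (by simp [hmem])
      | some al' =>
        obtain ⟨h1, h2⟩ := pvFindReplace_count c al al' hfr
        simp only [if_neg h0]
        apply ih
        intro c'
        rw [PySem.Dict.getD_insert]
        by_cases hc : c' = c
        · subst hc
          simp only [if_pos trivial]
          have := H c'; omega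
        · simp [hc, h2 c' hc, H c']

-- the counter built by Source B's first loop holds the character counts of str2
lemma pvCount2_getD (str2 : String) (c : Char) :
    (pvCount2 str2).getD c 0 = (str2.toList.count c : Int) := by
  unfold pvCount2
  rw [PySem.Dict.getD_foldl_insert_add_one]
  simp

-- ===== VERDICT (by name: the statement is the Claim_ definition above) =====
theorem angram_solution1_spec : Claim_equal_angram_solution1 := by
  intro str1 str2 _
  unfold Spec_angram_solution1 angram_solution1 angram_solution1_alt
  apply pvLoop_eq
  intro c
  rw [pvCount2_getD, List.count_map_of_injective _ _ (fun a b => by simp)]
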